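-- pv_equiv track=rewrite | github.com/tomtang502/Pith-Train | tools/memory_estimator/model_profile.py | compute_layer_distribution
-- ===== SOURCE A (Python) =====
-- def compute_layer_distribution(num_hidden_layers: int, num_stages: int) -> list[int]:
--     """
--     Distribute decoder layers across pipeline stages.
--
--     Matches the algorithm in pithtrain/dualpipe/layer_partition.py:
--     even base allocation, remainder layers go to inner stages first
--     (edges stay light to compensate for embed/head overhead).
--     """
--     assert num_hidden_layers >= num_stages >= 1
--     base, remainder = divmod(num_hidden_layers, num_stages)
--     layers = [base] * num_stages
--     for _ in range(remainder):
--         min_val = min(layers)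
--         best = None
--         for i in range(1, num_stages - 1):
--             if layers[i] == min_val:
--                 best = i
--                 break
--         if best is None:
--             for i in range(num_stages):
--                 if layers[i] == min_val:
--                     best = i
--                     break
--         layers[best] += 1
--     return layers
-- ===== SOURCE B (Python) =====
-- def compute_layer_distribution(num_hidden_layers: int, num_stages: int) -> list[int]:
--     """Same distribution via a precomputed priority order and one bumping pass
--     (no repeated min-scans): inner stages 1..n-2 first, then stage 0, then n-1."""
--     assert num_hidden_layers >= num_stages >= 1
--     base, remainder = divmod(num_hidden_layers, num_stages)
--     layers = [base] * num_stages
--     order = list(range(1, num_stages - 1)) + [0, num_stages - 1]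
--     for idx in order[:remainder]:
--         layers[idx] += 1
--     return layers
-- ===== Notes on version B (the rewrite author's own statement) =====
-- stated objective: faster
-- what changed: Replaces A's per-remainder-layer min-scan plus two linear index searches with a precomputed fixed priority order (inner stages, then stage 0) and a single pass bumping order[:remainder].
import Mathlib
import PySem

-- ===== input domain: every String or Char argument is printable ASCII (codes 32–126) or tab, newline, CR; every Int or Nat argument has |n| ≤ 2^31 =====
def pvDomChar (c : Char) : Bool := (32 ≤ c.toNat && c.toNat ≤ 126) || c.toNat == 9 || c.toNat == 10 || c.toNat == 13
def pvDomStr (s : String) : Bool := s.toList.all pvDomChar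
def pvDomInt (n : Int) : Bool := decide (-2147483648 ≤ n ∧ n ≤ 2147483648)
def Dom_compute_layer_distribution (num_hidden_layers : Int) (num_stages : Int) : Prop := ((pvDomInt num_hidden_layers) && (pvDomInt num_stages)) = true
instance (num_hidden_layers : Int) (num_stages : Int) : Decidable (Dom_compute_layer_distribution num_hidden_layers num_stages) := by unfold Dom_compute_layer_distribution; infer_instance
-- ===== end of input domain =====

-- B replaces A's repeated min-scan per remainder layer by a precomputed priority order
-- (inner stages 1..n-2 first, then stage 0) and a single bumping pass.


-- ===== PORT A =====
-- 'best = None; inner search with break; if best is None: fallback search with break'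
def clda_pick (num_stages : Int) (layers : List Int) (min_val : Int) : Option Int :=
  match (PySem.List.pyRange 1 (num_stages - 1) 1).find?
      (fun i => PySem.List.pyGet? layers i == some min_val) with
  | some i => some i
  | none => (PySem.List.pyRange 0 num_stages 1).find?
      (fun i => PySem.List.pyGet? layers i == some min_val)

-- one iteration of A's 'for _ in range(remainder)' body
def clda_step (num_stages : Int) (layers : List Int) : List Int :=
  match PySem.List.min? layers (fun x => x) with
  | none => layers          -- min([]) raises ValueError; excluded by Pre_
  | some min_val =>
    match clda_pick num_stages layers min_val with
    | none => layers        -- then layers[None] raises TypeError; unreachable under Pre_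
    | some b => PySem.List.pySetD layers b (PySem.List.pyGetD layers b 0 + 1)

def compute_layer_distribution (num_hidden_layers : Int) (num_stages : Int) : List Int :=
  let base := PySem.Int.floordiv num_hidden_layers num_stages
  let remainder := PySem.Int.mod num_hidden_layers num_stages
  let layers := List.replicate num_stages.toNat base
  (PySem.List.pyRange 0 remainder 1).foldl (fun L _ => clda_step num_stages L) layers

-- ===== PORT B =====
def compute_layer_distribution_alt (num_hidden_layers : Int) (num_stages : Int) : List Int :=
  let base := PySem.Int.floordiv num_hidden_layers num_stages
  let remainder := PySem.Int.mod num_hidden_layers num_stages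
  let layers := List.replicate num_stages.toNat base
  let order := PySem.List.pyRange 1 (num_stages - 1) 1 ++ [0, num_stages - 1]
  (PySem.List.slice order none (some remainder)).foldl
    (fun L idx => PySem.List.pySetD L idx (PySem.List.pyGetD L idx 0 + 1)) layers

-- ===== PRECONDITION & SPEC =====
-- A asserts 'num_hidden_layers >= num_stages >= 1' and raises AssertionError otherwise;
-- exactly those raising inputs are excluded (B raises there too).
def Pre_compute_layer_distribution (num_hidden_layers : Int) (num_stages : Int) : Prop :=
  1 ≤ num_stages ∧ num_stages ≤ num_hidden_layers
instance (num_hidden_layers : Int) (num_stages : Int) : Decidable (Pre_compute_layer_distribution num_hidden_layers num_stages) := by unfold Pre_compute_layer_distribution; infer_instance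

def pvWitness_compute_layer_distribution : Int × Int := (11, 4)

def Spec_compute_layer_distribution (num_hidden_layers : Int) (num_stages : Int) (out : List Int) : Prop := out = compute_layer_distribution_alt num_hidden_layers num_stages
instance (num_hidden_layers : Int) (num_stages : Int) (out : List Int) : Decidable (Spec_compute_layer_distribution num_hidden_layers num_stages out) := by unfold Spec_compute_layer_distribution; infer_instance

-- ===== CLAIM (what is proved, stated in full; the proofs are below) =====
def Claim_equal_compute_layer_distribution : Prop := ∀ (num_hidden_layers : Int) (num_stages : Int), Dom_compute_layer_distribution num_hidden_layers num_stages → Pre_compute_layer_distribution num_hidden_layers num_stages → Spec_compute_layer_distribution num_hidden_layers num_stages (compute_layer_distribution num_hidden_layers num_stages)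

-- ===== LEMMAS AND PROOFS =====

-- how many extra layers stage i carries after k bumps (valid for k ≤ n-1)
def cldBump (n k i : Nat) : Int :=
  if (1 ≤ i ∧ i ≤ k ∧ i + 2 ≤ n) ∨ (1 ≤ k ∧ k + 1 = n ∧ i = 0) then 1 else 0

-- the stage index bumped at step k (valid for k + 2 ≤ n)
def cldOrd (n k : Nat) : Int := if k + 3 ≤ n then ((k + 1 : Nat) : Int) else 0

-- state invariant: the layer list after k bump steps
def cldOK (n : Nat) (base : Int) (k : Nat) (L : List Int) : Prop :=
  L.length = n ∧ ∀ j : Nat, j < n → L.getD j 0 = base + cldBump n k j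

lemma cld_foldl_const {α β : Type} (f : α → α) (l : List β) (s : α) :
    l.foldl (fun a _ => f a) s = f^[l.length] s := by
  induction l generalizing s with
  | nil => rfl
  | cons x t ih => simp [List.foldl_cons, ih, Function.iterate_succ_apply]

lemma cld_min (n : Nat) (base : Int) (k : Nat) (L : List Int) (hn : 1 ≤ n)
    (hOK : cldOK n base k L) :
    PySem.List.min? L (fun x => x) = some base := by
  obtain ⟨hlen, hget⟩ := hOK
  have hb : L.getD (n-1) 0 = base := by
    rw [hget (n-1) (by omega)]
    unfold cldBump
    split_ifs with h
    · omega
    · ring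
  have hbmem : base ∈ L := by
    rw [List.getD_eq_getElem L 0 (by omega : n - 1 < L.length)] at hb
    rw [← hb]; exact List.getElem_mem _
  cases hmin : PySem.List.min? L (fun x => x) with
  | none =>
    rw [PySem.List.min?_eq_none_iff] at hmin
    subst hmin; simp at hlen; omega
  | some m =>
    have hmem : m ∈ L := PySem.List.min?_mem hmin
    have hisMin := PySem.List.min?_isMin hmin base hbmem
    obtain ⟨i, hi, hieq⟩ := List.mem_iff_getElem.mp hmem
    have := hget i (by omega)
    rw [List.getD_eq_getElem L 0 hi, hieq] at this
    unfold cldBump at this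
    split_ifs at this <;> simp at hisMin ⊢ <;> omega

lemma cld_p (n : Nat) (base : Int) (k : Nat) (L : List Int)
    (hOK : cldOK n base k L) (i : Int) (h0 : 0 ≤ i) (h1 : i < (n : Int)) :
    ((PySem.List.pyGet? L i == some base) = true) ↔ cldBump n k i.toNat = 0 := by
  obtain ⟨hlen, hget⟩ := hOK
  have hi : i = ((i.toNat : Nat) : Int) := by omega
  rw [hi, PySem.List.pyGet?_natCast]
  have hlt : i.toNat < L.length := by omega
  rw [List.getElem?_eq_getElem hlt]
  have := hget i.toNat (by omega)
  rw [List.getD_eq_getElem L 0 hlt] at this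
  rw [this]
  unfold cldBump
  split_ifs <;> simp <;> omega

lemma cld_pick_lem (ns : Int) (n : Nat) (hns : ns = (n : Int)) (base : Int) (k : Nat)
    (hk : k + 2 ≤ n) (L : List Int) (hOK : cldOK n base k L) :
    clda_pick ns L base = some (cldOrd n k) := by
  have hp := cld_p n base k L hOK
  unfold clda_pick cldOrd
  by_cases hc : k + 3 ≤ n
  · rw [PySem.List.pyRange_one_append 1 ((k:Int)+1) (ns-1) (by omega) (by omega)]
    rw [List.find?_append]
    have h1 : (PySem.List.pyRange 1 ((k:Int)+1) 1).find?
        (fun i => PySem.List.pyGet? L i == some base) = none := by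
      rw [List.find?_eq_none]
      intro x hx
      rw [PySem.List.mem_pyRange_one] at hx
      simp only [hp x (by omega) (by omega)]
      unfold cldBump
      split_ifs with h
      · simp
      · exfalso; omega
    rw [h1]
    rw [PySem.List.pyRange_one_cons (by omega : (k:Int)+1 < ns-1)]
    rw [List.find?_cons_of_pos]
    · simp [hc]
    · rw [hp ((k:Int)+1) (by omega) (by omega)]
      unfold cldBump
      split_ifs with h
      · exfalso; omega
      · rfl
  · have h1 : (PySem.List.pyRange 1 (ns - 1) 1).find?
        (fun i => PySem.List.pyGet? L i == some base) = none := by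
      rw [List.find?_eq_none]
      intro x hx
      rw [PySem.List.mem_pyRange_one] at hx
      simp only [hp x (by omega) (by omega)]
      unfold cldBump
      split_ifs with h
      · simp
      · exfalso; omega
    rw [h1]
    rw [PySem.List.pyRange_one_cons (by omega : (0:Int) < ns)]
    rw [List.find?_cons_of_pos]
    · simp [hc]
    · rw [hp 0 (by omega) (by omega)]
      unfold cldBump
      split_ifs with h
      · exfalso; omega
      · rfl

lemma cld_step_lem (ns : Int) (n : Nat) (hns : ns = (n : Int)) (base : Int) (k : Nat)
    (hk : k + 2 ≤ n) (L : List Int) (hOK : cldOK n base k L) :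
    clda_step ns L = PySem.List.pySetD L (cldOrd n k) (PySem.List.pyGetD L (cldOrd n k) 0 + 1)
      ∧ cldOK n base (k + 1)
        (PySem.List.pySetD L (cldOrd n k) (PySem.List.pyGetD L (cldOrd n k) 0 + 1)) := by
  have hlen := hOK.1
  have hord0 : 0 ≤ cldOrd n k := by unfold cldOrd; split_ifs <;> omega
  have hordlt : (cldOrd n k).toNat < n := by unfold cldOrd; split_ifs <;> omega
  have hbump0 : cldBump n k (cldOrd n k).toNat = 0 := by
    unfold cldBump cldOrd
    split_ifs <;> simp_all <;> omega
  have hval : PySem.List.pyGetD L (cldOrd n k) 0 = base := by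
    rw [PySem.List.pyGetD_eq_getElem L 0 hord0 (by omega : cldOrd n k < (L.length : Int))]
    have := hOK.2 (cldOrd n k).toNat (by omega)
    rw [List.getD_eq_getElem L 0 (by omega)] at this
    rw [this, hbump0, add_zero]
  constructor
  · unfold clda_step
    rw [cld_min n base k L (by omega) hOK]
    show (match clda_pick ns L base with
      | none => L
      | some b => PySem.List.pySetD L b (PySem.List.pyGetD L b 0 + 1)) = _
    rw [cld_pick_lem ns n hns base k hk L hOK]
  · rw [PySem.List.pySetD_of_nonneg L _ hord0]
    constructor
    · simp [hlen]
    · intro j hj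
      rw [List.getD_eq_getElem?_getD, List.getElem?_set]
      by_cases hje : (cldOrd n k).toNat = j
      · subst hje
        have hb1 : cldBump n (k+1) (cldOrd n k).toNat = 1 := by
          unfold cldBump cldOrd
          split_ifs <;> simp_all <;> omega
        rw [hb1, if_pos rfl, if_pos (by omega : (cldOrd n k).toNat < L.length)]
        rw [hval]
        rfl
      · rw [if_neg hje]
        rw [← List.getD_eq_getElem?_getD]
        rw [hOK.2 j hj]
        have hsame : cldBump n (k+1) j = cldBump n k j := by
          have hne : (cldOrd n k).toNat ≠ j := hje
          unfold cldBump
          unfold cldOrd at hne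
          by_cases hc : k + 3 ≤ n
          · rw [if_pos hc] at hne
            split_ifs <;> simp_all <;> omega
          · rw [if_neg hc] at hne
            split_ifs <;> simp_all <;> omega
        rw [hsame]

lemma cld_ord_at (ns : Int) (n : Nat) (hns : ns = (n : Int)) (k : Nat) (hk : k + 2 ≤ n) :
    (PySem.List.pyRange 1 (ns - 1) 1 ++ [0, ns - 1])[k]? = some (cldOrd n k) := by
  have hlen1 : (PySem.List.pyRange 1 (ns - 1) 1).length = n - 2 := by
    rw [PySem.List.length_pyRange_one]; omega
  by_cases hc : k + 3 ≤ n
  · rw [List.getElem?_append_left (by omega)]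
    rw [PySem.List.getElem?_pyRange_one]
    rw [if_pos (by omega)]
    unfold cldOrd
    rw [if_pos hc]
    push_cast
    ring_nf
  · have hkeq : k = n - 2 := by omega
    rw [List.getElem?_append_right (by omega)]
    unfold cldOrd
    rw [if_neg hc]
    rw [hlen1, hkeq]
    simp

lemma cld_iter (ns : Int) (n : Nat) (hns : ns = (n : Int)) (base : Int) (r : Nat)
    (hr : r + 1 ≤ n) (k : Nat) (hk : k ≤ r) :
    (clda_step ns)^[k] (List.replicate n base)
        = ((PySem.List.pyRange 1 (ns - 1) 1 ++ [0, ns - 1]).take k).foldl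
            (fun L idx => PySem.List.pySetD L idx (PySem.List.pyGetD L idx 0 + 1))
            (List.replicate n base)
      ∧ cldOK n base k ((clda_step ns)^[k] (List.replicate n base)) := by
  induction k with
  | zero =>
    refine ⟨by simp, by simp, ?_⟩
    intro j hj
    rw [Function.iterate_zero_apply]
    rw [List.getD_eq_getElem (List.replicate n base) 0 (by simpa using hj)]
    rw [List.getElem_replicate]
    unfold cldBump
    split_ifs with h
    · omega
    · simp
  | succ k ih =>
    obtain ⟨hEq, hOK⟩ := ih (by omega)
    have hstep := cld_step_lem ns n hns base k (by omega) _ hOK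
    have hit : (clda_step ns)^[k+1] (List.replicate n base)
        = PySem.List.pySetD ((clda_step ns)^[k] (List.replicate n base)) (cldOrd n k)
            (PySem.List.pyGetD ((clda_step ns)^[k] (List.replicate n base)) (cldOrd n k) 0 + 1) := by
      rw [Function.iterate_succ_apply', hstep.1]
    constructor
    · rw [hit, hEq]
      rw [List.take_add_one, cld_ord_at ns n hns k (by omega)]
      rw [List.foldl_append]
      rfl
    · rw [hit]; exact hstep.2

-- ===== VERDICT (by name: the statement is the Claim_ definition above) =====
theorem compute_layer_distribution_spec : Claim_equal_compute_layer_distribution := by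
  intro nh ns _ hPre
  obtain ⟨h1, _⟩ := hPre
  unfold Spec_compute_layer_distribution
  unfold compute_layer_distribution compute_layer_distribution_alt
  simp only []
  have hr0 : 0 ≤ PySem.Int.mod nh ns := PySem.Int.mod_nonneg nh (by omega)
  have hrlt : PySem.Int.mod nh ns < ns := PySem.Int.mod_lt nh (by omega)
  have hns : ns = ((ns.toNat : Nat) : Int) := by omega
  rw [cld_foldl_const]
  have hlenA : (PySem.List.pyRange 0 (PySem.Int.mod nh ns) 1).length
      = (PySem.Int.mod nh ns).toNat := by
    rw [PySem.List.length_pyRange_one]; omega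
  rw [hlenA]
  rw [PySem.List.slice_to _ hr0]
  exact (cld_iter ns ns.toNat hns (PySem.Int.floordiv nh ns) (PySem.Int.mod nh ns).toNat
    (by omega) (PySem.Int.mod nh ns).toNat le_rfl).1
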